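-- pv_equiv track=rewrite | github.com/minnseong/Algorithm | programmers/Level 2/pickupMandarin.py | solution
-- ===== SOURCE A (Python) =====
-- from collections import defaultdict
--
-- def solution(k, tangerine):
--     answer = 0
--
--     fruits = defaultdict(int)
--     for t in tangerine:
--         fruits[t] += 1
--
--     arr = sorted([value for value in fruits.values()], reverse=True)
--
--     for a in arr:
--         k -= a
--         answer += 1
--         if k <= 0:
--             break
--
--     return answer
-- ===== SOURCE B (Python) =====
-- from collections import Counter
--
-- def solution(k, tangerine):
--     cnt = Counter(tangerine)
--     buckets = Counter(cnt.values())
--     m = max(cnt.values(), default=0)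
--     answer = 0
--     for c in range(m, 0, -1):
--         for _ in range(buckets[c]):
--             k -= c
--             answer += 1
--             if k <= 0:
--                 return answer
--     return answer
-- ===== Notes on version B (the rewrite author's own statement) =====
-- stated objective: alternative
-- what changed: Replaces the comparison sort of the occurrence counts by a counting-sort traversal: a second Counter buckets the counts, and the greedy loop walks the buckets from the maximal count downwards, subtracting one group at a time.
import Mathlib
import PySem

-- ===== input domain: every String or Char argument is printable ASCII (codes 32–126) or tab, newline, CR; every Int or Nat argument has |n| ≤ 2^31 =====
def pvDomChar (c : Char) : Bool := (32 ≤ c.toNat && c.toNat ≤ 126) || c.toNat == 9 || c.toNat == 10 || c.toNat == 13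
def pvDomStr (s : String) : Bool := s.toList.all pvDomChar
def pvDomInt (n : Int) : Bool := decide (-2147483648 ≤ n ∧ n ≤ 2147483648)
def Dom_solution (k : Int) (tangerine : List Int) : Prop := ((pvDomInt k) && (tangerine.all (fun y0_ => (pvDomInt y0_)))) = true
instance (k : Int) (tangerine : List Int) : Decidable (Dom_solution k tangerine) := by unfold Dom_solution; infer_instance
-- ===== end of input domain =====

-- B replaces the descending comparison sort of the occurrence counts by a counting-sort walk
-- over a bucket Counter of the counts (alternative decomposition; same results).

-- ===== PORT A =====
-- for a in arr: k -= a; answer += 1; if k <= 0: break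
def pvALoop : List Int → Int → Int → Int
  | [], _, answer => answer
  | a :: rest, k, answer =>
    if k - a ≤ 0 then answer + 1 else pvALoop rest (k - a) (answer + 1)

def solution (k : Int) (tangerine : List Int) : Int :=
  let fruits := tangerine.foldl (fun d t => d.modify t 0 (· + 1)) PySem.Dict.empty
  let arr := PySem.List.sorted (fruits.values.map (fun value => value)) (fun x => x) true
  pvALoop arr k 0

-- ===== PORT B =====
-- inner: for _ in range(n): k -= c; answer += 1; if k <= 0: return answer  (inl = early return)
def pvBInner : Nat → Int → Int → Int → Int ⊕ (Int × Int)
  | 0, _, k, answer => Sum.inr (k, answer)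
  | n + 1, c, k, answer =>
    if k - c ≤ 0 then Sum.inl (answer + 1)
    else pvBInner n c (k - c) (answer + 1)

-- outer: for c in range(m, 0, -1): …
def pvBOuter (buckets : PySem.Dict Int Int) : Nat → Int → Int → Int
  | 0, _, answer => answer
  | c + 1, k, answer =>
    match pvBInner (buckets.getD ((c : Int) + 1) 0).toNat ((c : Int) + 1) k answer with
    | Sum.inl answer => answer
    | Sum.inr (k, answer) => pvBOuter buckets c k answer

def solution_alt (k : Int) (tangerine : List Int) : Int :=
  let cnt := PySem.Dict.counter tangerine
  let buckets := PySem.Dict.counter cnt.values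
  let m := PySem.List.maxD cnt.values (fun x => x) 0
  pvBOuter buckets m.toNat k 0

-- ===== PRECONDITION & SPEC =====
def Spec_solution (k : Int) (tangerine : List Int) (out : Int) : Prop := out = solution_alt k tangerine
instance (k : Int) (tangerine : List Int) (out : Int) : Decidable (Spec_solution k tangerine out) := by unfold Spec_solution; infer_instance

-- ===== CLAIM (what is proved, stated in full; the proofs are below) =====
def Claim_equal_solution : Prop := ∀ (k : Int) (tangerine : List Int), Dom_solution k tangerine → Spec_solution k tangerine (solution k tangerine)

-- ===== LEMMAS AND PROOFS =====

-- the descending list B effectively traverses: counts c from c down to 1, each repeated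
-- as often as it occurs among the values
def pvFlat (vals : List Int) : Nat → List Int
  | 0 => []
  | c + 1 => List.replicate (vals.count ((c : Int) + 1)) ((c : Int) + 1) ++ pvFlat vals c

lemma count_pvFlat (vals : List Int) (c : Nat) (x : Int) :
    (pvFlat vals c).count x = if 1 ≤ x ∧ x ≤ (c : Int) then vals.count x else 0 := by
  induction c with
  | zero =>
    simp only [pvFlat, List.count_nil]
    rw [if_neg]; omega
  | succ c ih =>
    simp only [pvFlat, List.count_append, List.count_replicate, ih]
    push_cast
    split_ifs <;> simp_all <;> omega

lemma pvFlat_perm (vals : List Int) (c : Nat) (h : ∀ v ∈ vals, 1 ≤ v ∧ v ≤ (c : Int)) :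
    (pvFlat vals c).Perm vals := by
  rw [List.perm_iff_count]
  intro a
  rw [count_pvFlat]
  split_ifs with h1
  · rfl
  · symm
    rw [List.count_eq_zero]
    intro ha
    exact h1 (h a ha)

lemma pvFlat_le (vals : List Int) (c : Nat) : ∀ x ∈ pvFlat vals c, x ≤ (c : Int) := by
  induction c with
  | zero => simp [pvFlat]
  | succ c ih =>
    intro x hx
    rcases List.mem_append.mp hx with hx | hx
    · rw [List.eq_of_mem_replicate hx]; push_cast; omega
    · have := ih x hx; push_cast; push_cast at this; omega

lemma pvFlat_pairwise (vals : List Int) (c : Nat) :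
    (pvFlat vals c).Pairwise (fun a b => b ≤ a) := by
  induction c with
  | zero => simp [pvFlat]
  | succ c ih =>
    rw [pvFlat, List.pairwise_append]
    refine ⟨List.pairwise_replicate.mpr (Or.inr le_rfl), ih, ?_⟩
    intro a ha b hb
    rw [List.eq_of_mem_replicate ha]
    have := pvFlat_le vals c b hb
    omega

lemma sorted_eq_pvFlat (vals : List Int) (c : Nat)
    (h : ∀ v ∈ vals, 1 ≤ v ∧ v ≤ (c : Int)) :
    PySem.List.sorted vals (fun x => x) true = pvFlat vals c := by
  refine List.Perm.eq_of_pairwise (le := fun a b => b ≤ a) ?_ ?_ ?_ ?_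
  · intro a b _ _ h1 h2; omega
  · exact PySem.List.sorted_pairwise_rev vals (fun x => x)
  · exact pvFlat_pairwise vals c
  · exact (PySem.List.sorted_perm vals (fun x => x) true).trans (pvFlat_perm vals c h).symm

lemma aLoop_replicate (n : Nat) (c : Int) (rest : List Int) (k answer : Int) :
    pvALoop (List.replicate n c ++ rest) k answer =
      (match pvBInner n c k answer with
       | Sum.inl a => a
       | Sum.inr (k', a') => pvALoop rest k' a') := by
  induction n generalizing k answer with
  | zero => simp [pvBInner]
  | succ n ih =>
    rw [List.replicate_succ, List.cons_append, pvALoop, pvBInner]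
    split_ifs with h
    · rfl
    · exact ih (k - c) (answer + 1)

lemma bOuter_eq_aLoop (vals : List Int) (c : Nat) (k answer : Int) :
    pvBOuter (PySem.Dict.counter vals) c k answer = pvALoop (pvFlat vals c) k answer := by
  induction c generalizing k answer with
  | zero => simp [pvBOuter, pvFlat, pvALoop]
  | succ c ih =>
    rw [pvBOuter, pvFlat, aLoop_replicate]
    rw [PySem.Dict.getD_counter, Int.toNat_natCast]
    cases h : pvBInner (vals.count ((c : Int) + 1)) ((c : Int) + 1) k answer with
    | inl a => rfl
    | inr p => exact ih p.1 p.2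

lemma counter_values_eq (t : List Int) :
    (PySem.Dict.counter t).values = (PySem.Set.ofList t).map (fun x => ((t.count x : Nat) : Int)) := by
  simp [PySem.Dict.values, PySem.Dict.items_counter, List.map_map, Function.comp_def]

lemma counter_values_pos (t : List Int) :
    ∀ v ∈ (PySem.Dict.counter t).values, 1 ≤ v := by
  rw [counter_values_eq]
  intro v hv
  rcases List.mem_map.mp hv with ⟨x, hx, rfl⟩
  have hxs : x ∈ t := (PySem.Set.mem_ofList t x).mp hx
  have : 0 < t.count x := List.count_pos_iff.mpr hxs
  omega

lemma counter_values_le_maxD (t : List Int) :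
    ∀ v ∈ (PySem.Dict.counter t).values,
      v ≤ PySem.List.maxD (PySem.Dict.counter t).values (fun x => x) 0 := by
  intro v hv
  have hne : (PySem.Dict.counter t).values ≠ [] := List.ne_nil_of_mem hv
  have h := PySem.List.max?_eq_some_maxD (PySem.Dict.counter t).values (fun x => x) 0 hne
  exact PySem.List.max?_isMax h v hv

-- ===== VERDICT (by name: the statement is the Claim_ definition above) =====
theorem solution_spec : Claim_equal_solution := by
  intro k t _
  unfold Spec_solution solution solution_alt
  simp only [← PySem.Dict.counter_eq_foldl, List.map_id']
  have hb : ∀ v ∈ (PySem.Dict.counter t).values, 1 ≤ v ∧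
      v ≤ (((PySem.List.maxD (PySem.Dict.counter t).values (fun x => x) 0).toNat : Nat) : Int) :=
    fun v hv => ⟨counter_values_pos t v hv,
      le_trans (counter_values_le_maxD t v hv) (Int.self_le_toNat _)⟩
  rw [bOuter_eq_aLoop, sorted_eq_pvFlat _ _ hb]
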